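-- pv_equiv track=rewrite | github.com/martan3d/PTReceiver | app.py | parseNodeData
-- ===== SOURCE A (Python) =====
-- def parseNodeData(size, data):
--     messages = []
--     msg = []
--     if size > 0:
--        msg.append(data[0])
--     for i in range(1, size):
--         if data[i] == 0x7e:
--            messages.append(msg)
--            msg = []
--            msg.append(data[i])
--         else:
--            msg.append(data[i])
--     messages.append(msg)
--     return messages
-- ===== SOURCE B (Python) =====
-- def parseNodeData(size, data):
--     cuts = [i for i in range(1, size) if data[i] == 0x7e]
--     bounds = [0] + cuts + [size]
--     return [[data[j] for j in range(start, end)]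
--             for start, end in zip(bounds, bounds[1:])]
-- ===== Notes on version B (the rewrite author's own statement) =====
-- stated objective: alternative
-- what changed: B replaces A's single stateful accumulator loop by a two-phase boundary decomposition: first collect the 0x7e marker positions, then materialize each chunk directly from consecutive boundary pairs.
import Mathlib
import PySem

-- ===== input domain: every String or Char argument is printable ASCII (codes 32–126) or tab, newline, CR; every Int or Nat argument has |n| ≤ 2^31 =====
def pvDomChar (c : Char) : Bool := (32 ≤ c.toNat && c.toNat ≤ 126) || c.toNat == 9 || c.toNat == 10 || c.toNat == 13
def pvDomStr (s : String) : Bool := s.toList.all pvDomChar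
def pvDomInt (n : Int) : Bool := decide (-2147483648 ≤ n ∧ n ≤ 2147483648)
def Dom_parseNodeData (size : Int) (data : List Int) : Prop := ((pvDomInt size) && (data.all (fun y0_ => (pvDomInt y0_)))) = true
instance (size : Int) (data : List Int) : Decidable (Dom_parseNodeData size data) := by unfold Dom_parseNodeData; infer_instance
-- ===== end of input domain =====

-- B replaces A's stateful accumulator loop by a boundary decomposition (collect 0x7e marker
-- positions, then build each chunk from consecutive boundary pairs); alternative, same cost.


-- ===== PORT A =====
-- literal transliteration of A: msg accumulator, fold over range(1, size); data[i] via pyGetD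
-- (in range under Pre_parseNodeData).
def parseNodeData (size : Int) (data : List Int) : List (List Int) :=
  let msg : List Int := if size > 0 then [PySem.List.pyGetD data 0 0] else []
  let st :=
    (PySem.List.pyRange 1 size 1).foldl
      (fun (st : List (List Int) × List Int) i =>
        if PySem.List.pyGetD data i 0 = 0x7e then
          (st.1 ++ [st.2], [PySem.List.pyGetD data i 0])
        else
          (st.1, st.2 ++ [PySem.List.pyGetD data i 0]))
      (([] : List (List Int)), msg)
  st.1 ++ [st.2]

-- ===== PORT B =====
-- literal transliteration of B: marker positions, boundary list, chunks from consecutive pairs.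
def parseNodeData_alt (size : Int) (data : List Int) : List (List Int) :=
  let cuts := (PySem.List.pyRange 1 size 1).filter (fun i => PySem.List.pyGetD data i 0 = 0x7e)
  let bounds := [(0 : Int)] ++ cuts ++ [size]
  (bounds.zip bounds.tail).map
    (fun se => (PySem.List.pyRange se.1 se.2 1).map (fun j => PySem.List.pyGetD data j 0))

-- ===== PRECONDITION & SPEC =====
-- Pre_ excludes exactly the inputs where A raises IndexError (data[i] with i < size but
-- i ≥ len(data)); when size ≤ 0 no index is touched and size ≤ length holds vacuously for
-- the inputs A accepts only via this single inequality, which covers them all.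
def Pre_parseNodeData (size : Int) (data : List Int) : Prop := size ≤ data.length
instance (size : Int) (data : List Int) : Decidable (Pre_parseNodeData size data) := by unfold Pre_parseNodeData; infer_instance
def pvWitness_parseNodeData : Int × List Int := (5, [1, 126, 2, 126, 3])
def Spec_parseNodeData (size : Int) (data : List Int) (out : List (List Int)) : Prop := out = parseNodeData_alt size data
instance (size : Int) (data : List Int) (out : List (List Int)) : Decidable (Spec_parseNodeData size data out) := by unfold Spec_parseNodeData; infer_instance

-- ===== CLAIM =====
def Claim_equal_parseNodeData : Prop := ∀ (size : Int) (data : List Int), Dom_parseNodeData size data → Pre_parseNodeData size data → Spec_parseNodeData size data (parseNodeData size data)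

-- ===== LEMMAS AND PROOFS =====

-- canonical recursive grouping (proof-only helper)
def pvGroups (f : Int → Int) (p : Int → Bool) : List Int → List Int → List (List Int)
  | m, [] => [m]
  | m, i :: rest => if p i then m :: pvGroups f p [f i] rest else pvGroups f p (m ++ [f i]) rest

-- chunks between successive boundaries (proof-only helper)
def pvChunks (f : Int → Int) (e : Int) : Int → List Int → List (List Int)
  | s, [] => [(PySem.List.pyRange s e 1).map f]
  | s, c :: cs => (PySem.List.pyRange s c 1).map f :: pvChunks f e c cs

theorem pvFoldA (f : Int → Int) (p : Int → Bool) (L : List Int) :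
    ∀ (ms : List (List Int)) (m : List Int),
      (L.foldl (fun (st : List (List Int) × List Int) i =>
          if p i then (st.1 ++ [st.2], [f i]) else (st.1, st.2 ++ [f i])) (ms, m)).1
        ++ [(L.foldl (fun (st : List (List Int) × List Int) i =>
          if p i then (st.1 ++ [st.2], [f i]) else (st.1, st.2 ++ [f i])) (ms, m)).2]
      = ms ++ pvGroups f p m L := by
  induction L with
  | nil => intro ms m; simp [pvGroups]
  | cons i rest ih =>
    intro ms m
    by_cases h : p i
    · simp [pvGroups, h, ih]
    · simp [pvGroups, h, ih]

theorem pvZipChunks (f : Int → Int) (e : Int) (cs : List Int) :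
    ∀ (s : Int),
      (((s :: (cs ++ [e])).zip (cs ++ [e])).map
          (fun se => (PySem.List.pyRange se.1 se.2 1).map f))
        = pvChunks f e s cs := by
  induction cs with
  | nil => intro s; simp [pvChunks]
  | cons c cs ih => intro s; simp only [List.cons_append, List.zip_cons_cons, List.map_cons, pvChunks, ih]

theorem pvGroupsChunks (f : Int → Int) (p : Int → Bool) (b : Int) (n : Nat) :
    ∀ (a s : Int), s ≤ a → a ≤ b → (b - a).toNat = n →
      pvGroups f p ((PySem.List.pyRange s a 1).map f) (PySem.List.pyRange a b 1)
        = pvChunks f b s ((PySem.List.pyRange a b 1).filter p) := by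
  induction n with
  | zero =>
    intro a s hsa hab hn
    have hnil : PySem.List.pyRange a b 1 = [] :=
      PySem.List.pyRange_one_eq_nil (by omega)
    have hba : b = a := by omega
    simp [pvGroups, pvChunks, hba]
  | succ n ih =>
    intro a s hsa hab hn
    have hlt : a < b := by omega
    rw [PySem.List.pyRange_one_cons hlt]
    by_cases h : p a
    · simp only [pvGroups, h, if_pos, List.filter_cons_of_pos h, pvChunks]
      have h1 : [f a] = (PySem.List.pyRange a (a+1) 1).map f := by
        rw [PySem.List.pyRange_one_singleton]; simp
      rw [h1, ih (a+1) a (by omega) (by omega) (by omega)]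
    · simp only [pvGroups, h, if_neg, List.filter_cons_of_neg h, Bool.false_eq_true, not_false_iff]
      have h1 : (PySem.List.pyRange s a 1).map f ++ [f a] = (PySem.List.pyRange s (a+1) 1).map f := by
        rw [PySem.List.pyRange_one_succ_right hsa]; simp
      rw [h1, ih (a+1) s (by omega) (by omega) (by omega)]

-- ===== VERDICT =====
theorem parseNodeData_spec : Claim_equal_parseNodeData := by
  intro size data _ _
  unfold Spec_parseNodeData parseNodeData parseNodeData_alt
  set f : Int → Int := fun j => PySem.List.pyGetD data j 0 with hf
  set p : Int → Bool := fun i => decide (f i = 0x7e) with hp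
  simp only []
  by_cases hs : size > 0
  · simp only [hs, if_pos]
    have hfold := pvFoldA f p (PySem.List.pyRange 1 size 1) [] [f 0]
    -- the fold bodies coincide (the condition 'pyGetD data i 0 = 0x7e' is 'p i')
    have hfun : (fun (st : List (List Int) × List Int) i =>
          if f i = 0x7e then (st.1 ++ [st.2], [f i]) else (st.1, st.2 ++ [f i]))
        = (fun (st : List (List Int) × List Int) i =>
          if p i then (st.1 ++ [st.2], [f i]) else (st.1, st.2 ++ [f i])) := by
      funext st i; simp [hp]
    rw [hfun, hfold]
    have hz := pvZipChunks f size ((PySem.List.pyRange 1 size 1).filter p) 0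
    simp only [List.cons_append, List.nil_append] at hz ⊢
    rw [List.tail_cons, hz]
    have h1 : [f 0] = (PySem.List.pyRange 0 1 1).map f := by
      have h2 := PySem.List.pyRange_one_singleton (a := (0:Int))
      norm_num at h2
      rw [h2]; simp
    rw [h1]
    exact pvGroupsChunks f p size (size - 1).toNat 1 0 (by omega) (by omega) rfl
  · have hnil : PySem.List.pyRange 1 size 1 = [] :=
      PySem.List.pyRange_one_eq_nil (by omega)
    have hnil0 : PySem.List.pyRange 0 size 1 = [] :=
      PySem.List.pyRange_one_eq_nil (by omega)
    simp [hs, hnil, hnil0]
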